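-- pv_equiv track=rewrite | github.com/QianFuv/UpLang | src/uplang/web/service.py | _reorder_by_reference
-- ===== SOURCE A (Python) =====
-- def _reorder_by_reference(
--     target: dict[str, str], reference: dict[str, str]
-- ) -> dict[str, str]:
--     """Reorder target dict keys to match reference dict order."""
--     reordered = {}
--
--     for key in reference:
--         if key in target:
--             reordered[key] = target[key]
--
--     for key in target:
--         if key not in reordered:
--             reordered[key] = target[key]
--
--     return reordered
-- ===== SOURCE B (Python) =====
-- def _reorder_by_reference(target, reference):
--     """Reorder target dict keys to match reference dict order."""
--     pos = {key: i for i, key in enumerate(reference)}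
--     n = len(reference)
--     rank = {}
--     for j, key in enumerate(target):
--         rank[key] = pos.get(key, n + j)
--     return dict(sorted(target.items(), key=lambda kv: rank[kv[0]]))
-- ===== Notes on version B (the rewrite author's own statement) =====
-- stated objective: alternative
-- what changed: A's two filtering passes over reference and target are replaced by building a rank map (reference index for shared keys, len(reference) plus target index for the rest) and performing one stable sort of target's items by that rank.
import Mathlib
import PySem

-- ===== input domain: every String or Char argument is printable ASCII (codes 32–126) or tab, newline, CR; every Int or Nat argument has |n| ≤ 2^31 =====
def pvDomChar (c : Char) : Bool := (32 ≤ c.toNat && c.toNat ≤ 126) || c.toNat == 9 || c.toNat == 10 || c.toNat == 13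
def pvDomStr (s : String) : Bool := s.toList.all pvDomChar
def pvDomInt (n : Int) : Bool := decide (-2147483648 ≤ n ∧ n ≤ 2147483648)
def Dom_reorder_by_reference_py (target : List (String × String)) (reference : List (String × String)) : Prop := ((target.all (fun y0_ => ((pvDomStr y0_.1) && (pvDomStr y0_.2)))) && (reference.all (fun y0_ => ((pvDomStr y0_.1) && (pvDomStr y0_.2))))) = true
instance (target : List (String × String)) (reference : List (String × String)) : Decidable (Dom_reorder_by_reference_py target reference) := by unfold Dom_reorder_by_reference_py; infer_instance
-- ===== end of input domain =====

-- B replaces A's two filtering passes by a rank map (reference index, or len(reference)+target index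
-- for the rest) and one sort of target's items by that rank; objective: alternative decomposition, not speed.

-- ===== PORT A =====
def reorder_by_reference_py (target : List (String × String)) (reference : List (String × String)) : List (String × String) :=
  let tgt : PySem.Dict String String := PySem.Dict.mk target
  -- for key in reference: if key in target: reordered[key] = target[key]
  let d1 : PySem.Dict String String :=
    reference.foldl (fun d q => if tgt.contains q.1 then d.insert q.1 (tgt.getD q.1 "") else d)
      PySem.Dict.empty
  -- for key in target: if key not in reordered: reordered[key] = target[key]
  -- (target[key] cannot raise here — key iterates target — so getD with a dead "" default is exact)
  let d2 : PySem.Dict String String :=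
    target.foldl (fun d p => if d.contains p.1 then d else d.insert p.1 (tgt.getD p.1 "")) d1
  d2.items

-- ===== PORT B =====
def reorder_by_reference_py_alt (target : List (String × String)) (reference : List (String × String)) : List (String × String) :=
  -- pos = {key: i for i, key in enumerate(reference)}
  let pos : PySem.Dict String Int :=
    (PySem.List.enumerate (reference.map Prod.fst)).foldl
      (fun d p => d.insert p.2 p.1) PySem.Dict.empty
  let n : Int := reference.length
  -- for j, key in enumerate(target): rank[key] = pos.get(key, n + j)
  let rank : PySem.Dict String Int :=
    (PySem.List.enumerate (target.map Prod.fst)).foldl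
      (fun d p => d.insert p.2 (pos.getD p.2 (n + p.1))) PySem.Dict.empty
  -- dict(sorted(target.items(), key=lambda kv: rank[kv[0]]))
  -- (rank[kv[0]] cannot raise — every target key has a rank — so getD with a dead 0 default is exact)
  (PySem.Dict.ofList (PySem.List.sorted target (fun kv => rank.getD kv.1 0))).items

-- ===== PRECONDITION & SPEC =====
-- Pre_ requires distinct keys in each association list: the parameters are Python dicts, whose item
-- lists always have distinct keys, so duplicate-key lists are an artefact of the encoding, not inputs of A.
def Pre_reorder_by_reference_py (target : List (String × String)) (reference : List (String × String)) : Prop :=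
  (target.map Prod.fst).Nodup ∧ (reference.map Prod.fst).Nodup
instance (target : List (String × String)) (reference : List (String × String)) : Decidable (Pre_reorder_by_reference_py target reference) := by unfold Pre_reorder_by_reference_py; infer_instance

def pvWitness_reorder_by_reference_py : (List (String × String)) × (List (String × String)) :=
  ([("a", "1"), ("b", "2"), ("c", "3")], [("c", "x"), ("a", "y")])

def Spec_reorder_by_reference_py (target : List (String × String)) (reference : List (String × String)) (out : List (String × String)) : Prop := out = reorder_by_reference_py_alt target reference
instance (target : List (String × String)) (reference : List (String × String)) (out : List (String × String)) : Decidable (Spec_reorder_by_reference_py target reference out) := by unfold Spec_reorder_by_reference_py; infer_instance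

-- ===== CLAIM (what is proved, stated in full; the proofs are below) =====
def Claim_equal_reorder_by_reference_py : Prop := ∀ (target : List (String × String)) (reference : List (String × String)), Dom_reorder_by_reference_py target reference → Pre_reorder_by_reference_py target reference → Spec_reorder_by_reference_py target reference (reorder_by_reference_py target reference)

-- ===== LEMMAS AND PROOFS =====

-- The common canonical value: reference-ordered pairs present in target, then target's leftovers.
def pvRefPart (target reference : List (String × String)) : List (String × String) :=
  (reference.filter (fun q => (PySem.Dict.mk target).contains q.1)).map
    (fun q => (q.1, (PySem.Dict.mk target).getD q.1 ""))

def pvTailPart (target reference : List (String × String)) : List (String × String) :=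
  target.filter (fun p => !decide (p.1 ∈ reference.map Prod.fst))

-- a fold over enumerate inserting key ↦ f key index reads back as f key (index of the key)
theorem getD_enumFold (f : String → Int → Int) (ks : List String) (s : Int)
    (d0 : PySem.Dict String Int) (k : String) (dflt : Int) (hn : ks.Nodup) :
    ((PySem.List.enumerate ks s).foldl (fun d p => d.insert p.2 (f p.2 p.1)) d0).getD k dflt
      = if k ∈ ks then f k (s + ks.idxOf k) else d0.getD k dflt := by
  induction ks generalizing s d0 with
  | nil => simp [PySem.List.enumerate_nil]
  | cons a ks ih =>
    rw [PySem.List.enumerate_cons]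
    simp only [List.foldl_cons]
    rw [ih _ _ (hn.of_cons)]
    by_cases hk : k ∈ ks
    · have hka : k ≠ a := by rintro rfl; exact (List.nodup_cons.mp hn).1 hk
      simp only [hk, if_true, List.mem_cons, hka, or_true, if_true]
      have : (a :: ks).idxOf k = ks.idxOf k + 1 := by
        simp [hka.symm]
      rw [this]
      congr 1
      push_cast
      ring
    · by_cases hka : k = a
      · subst hka
        simp only [hk, if_false, List.mem_cons, true_or, if_true]
        rw [PySem.Dict.getD_insert_self]
        have : (k :: ks).idxOf k = 0 := by simp
        rw [this]
        norm_num
      · simp only [hk, if_false, List.mem_cons, hka, false_or, if_false]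
        rw [PySem.Dict.getD_insert_of_ne (hne := hka)]

-- a list with distinct keys is pairwise-increasing under the index of the key
theorem pairwise_idxOf_fst (l : List (String × String)) (hn : (l.map Prod.fst).Nodup) :
    l.Pairwise (fun a b => (l.map Prod.fst).idxOf a.1 < (l.map Prod.fst).idxOf b.1) := by
  rw [List.pairwise_iff_getElem]
  intro i j hi hj hij
  have hi' : i < (l.map Prod.fst).length := by simpa using hi
  have hj' : j < (l.map Prod.fst).length := by simpa using hj
  have h1 := List.Nodup.idxOf_getElem hn i hi'
  have h2 := List.Nodup.idxOf_getElem hn j hj'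
  rw [List.getElem_map] at h1 h2
  rw [h1, h2]
  exact hij

-- the skip-if-present fold appends the pairs whose key is new (keys distinct)
theorem items_foldl_skip (g : String → String) (l : List (String × String))
    (d : PySem.Dict String String) (hn : (l.map Prod.fst).Nodup) :
    (l.foldl (fun d p => if d.contains p.1 then d else d.insert p.1 (g p.1)) d).items
      = d.items ++ (l.filter (fun p => !d.contains p.1)).map (fun p => (p.1, g p.1)) := by
  induction l generalizing d with
  | nil => simp
  | cons p l ih =>
    simp only [List.map_cons, List.nodup_cons] at hn
    simp only [List.foldl_cons, List.filter_cons]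
    rcases Bool.eq_false_or_eq_true (d.contains p.1) with hc | hc
    · rw [hc]
      simp only [if_true, Bool.not_true, Bool.false_eq_true, if_false]
      exact ih d hn.2
    · rw [hc]
      simp only [Bool.false_eq_true, if_false, Bool.not_false, if_true, List.map_cons]
      rw [ih _ hn.2, PySem.Dict.items_insert_of_not_contains _ _ hc]
      have hfil : l.filter (fun q => !(d.insert p.1 (g p.1)).contains q.1)
          = l.filter (fun q => !d.contains q.1) := by
        apply List.filter_congr
        intro q hq
        have hne : q.1 ≠ p.1 := by
          intro h; exact hn.1 (h ▸ List.mem_map_of_mem hq)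
        rw [PySem.Dict.contains_insert]
        simp [hne]
      rw [hfil]
      simp

-- dict() of a pair list with distinct keys returns the list itself
theorem items_ofList_nodup (l : List (String × String)) (hn : (l.map Prod.fst).Nodup) :
    (PySem.Dict.ofList l).items = l := by
  have h := PySem.Dict.items_foldl_insert_fresh (l := l) (k := Prod.fst) (v := Prod.snd)
      (d := PySem.Dict.empty) (by intro a _; simp) hn
  simpa using h

theorem mem_refPart_iff (target reference : List (String × String))
    (ht : (target.map Prod.fst).Nodup) (x : String × String) :
    x ∈ pvRefPart target reference ↔ x ∈ target ∧ x.1 ∈ reference.map Prod.fst := by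
  unfold pvRefPart
  simp only [List.mem_map, List.mem_filter]
  constructor
  · rintro ⟨q, ⟨hqr, hqc⟩, rfl⟩
    rw [PySem.Dict.contains_mk] at hqc
    rcases List.any_eq_true.mp hqc with ⟨p, hp, hbeq⟩
    have hpq : p.1 = q.1 := by simpa using hbeq
    have hmem : (q.1, p.2) ∈ target := by
      have : (q.1, p.2) = p := Prod.ext hpq.symm rfl
      rw [this]; exact hp
    have hg : (PySem.Dict.mk target).getD q.1 "" = p.2 :=
      PySem.Dict.getD_of_mem_items (d := PySem.Dict.mk target) hmem (by simpa using ht) ""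
    exact ⟨by rw [hg]; exact hmem, ⟨q, hqr, rfl⟩⟩
  · rintro ⟨hxt, hx1⟩
    rcases hx1 with ⟨q, hqr, hq1⟩
    refine ⟨q, ⟨hqr, ?_⟩, ?_⟩
    · rw [PySem.Dict.contains_mk]
      exact List.any_eq_true.mpr ⟨x, hxt, by simp [hq1]⟩
    · have hg : (PySem.Dict.mk target).getD q.1 "" = x.2 := by
        rw [hq1]
        exact PySem.Dict.getD_of_mem_items (d := PySem.Dict.mk target)
          (k := x.1) (v := x.2) (by simpa using hxt) (by simpa using ht) ""
      rw [hg, hq1]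

theorem A_eq_canon (target reference : List (String × String))
    (ht : (target.map Prod.fst).Nodup) (hr : (reference.map Prod.fst).Nodup) :
    reorder_by_reference_py target reference
      = pvRefPart target reference ++ pvTailPart target reference := by
  have htgt : ∀ p ∈ target, (PySem.Dict.mk target).contains p.1 = true := by
    intro p hp
    rw [PySem.Dict.contains_mk]
    exact List.any_eq_true.mpr ⟨p, hp, by simp⟩
  have hgetD : ∀ p ∈ target, (PySem.Dict.mk target).getD p.1 "" = p.2 := by
    intro p hp
    exact PySem.Dict.getD_of_mem_items (d := PySem.Dict.mk target) hp (by simpa using ht) ""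
  simp only [reorder_by_reference_py]
  have hd1items :
      (reference.foldl (fun d q => if (PySem.Dict.mk target).contains q.1 then d.insert q.1 ((PySem.Dict.mk target).getD q.1 "") else d) PySem.Dict.empty).items
        = pvRefPart target reference := by
    have h1 := PySem.List.foldl_if_eq_foldl_filter
        (fun q : String × String => (PySem.Dict.mk target).contains q.1)
        (fun d q => d.insert q.1 ((PySem.Dict.mk target).getD q.1 ""))
        reference PySem.Dict.empty
    rw [h1]
    rw [PySem.Dict.items_foldl_insert_fresh _ Prod.fst
        (fun q => (PySem.Dict.mk target).getD q.1 "") PySem.Dict.empty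
        (by intro a _; simp)
        ((List.filter_sublist.map Prod.fst).nodup hr)]
    simp [pvRefPart, PySem.Dict.empty]
  rw [items_foldl_skip (fun k => (PySem.Dict.mk target).getD k "") target _ ht]
  rw [hd1items]
  have hkeys :
      ∀ p ∈ target,
        ((reference.foldl (fun d q => if (PySem.Dict.mk target).contains q.1 then d.insert q.1 ((PySem.Dict.mk target).getD q.1 "") else d) PySem.Dict.empty).contains p.1)
          = decide (p.1 ∈ reference.map Prod.fst) := by
    intro p hp
    rw [PySem.Dict.contains_eq_decide_mem_keys]
    have hk : (reference.foldl (fun d q => if (PySem.Dict.mk target).contains q.1 then d.insert q.1 ((PySem.Dict.mk target).getD q.1 "") else d) PySem.Dict.empty).keys = (pvRefPart target reference).map Prod.fst := by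
      simp only [PySem.Dict.keys, hd1items]
    rw [hk]
    apply decide_eq_decide.mpr
    unfold pvRefPart
    simp only [List.map_map, List.mem_map, Function.comp, List.mem_filter]
    constructor
    · rintro ⟨q, ⟨hqr, _⟩, hq1⟩
      exact ⟨q, hqr, hq1⟩
    · rintro ⟨q, hqr, hq1⟩
      exact ⟨q, ⟨hqr, by rw [hq1]; exact htgt p hp⟩, hq1⟩
  have hfil : target.filter (fun p => !(reference.foldl (fun d q => if (PySem.Dict.mk target).contains q.1 then d.insert q.1 ((PySem.Dict.mk target).getD q.1 "") else d) PySem.Dict.empty).contains p.1)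
      = pvTailPart target reference := by
    unfold pvTailPart
    apply List.filter_congr
    intro p hp
    rw [hkeys p hp]
  rw [hfil]
  have hmap : (pvTailPart target reference).map (fun p => (p.1, (PySem.Dict.mk target).getD p.1 "")) = pvTailPart target reference := by
    have hid : ∀ p ∈ pvTailPart target reference,
        (fun p : String × String => (p.1, (PySem.Dict.mk target).getD p.1 "")) p = id p := by
      intro p hp
      have hpt : p ∈ target := List.mem_of_mem_filter hp
      simp [hgetD p hpt]
    rw [List.map_congr_left hid, List.map_id]
  rw [hmap]

theorem B_eq_canon (target reference : List (String × String))
    (ht : (target.map Prod.fst).Nodup) (hr : (reference.map Prod.fst).Nodup) :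
    reorder_by_reference_py_alt target reference
      = pvRefPart target reference ++ pvTailPart target reference := by
  simp only [reorder_by_reference_py_alt]
  set tK := target.map Prod.fst with htK
  set refK := reference.map Prod.fst with hrefK
  set n : Int := (reference.length : Int) with hn
  set pos : PySem.Dict String Int :=
    (PySem.List.enumerate refK).foldl (fun d p => d.insert p.2 p.1) PySem.Dict.empty with hpos
  set rank : PySem.Dict String Int :=
    (PySem.List.enumerate tK).foldl (fun d p => d.insert p.2 (pos.getD p.2 (n + p.1)))
      PySem.Dict.empty with hrank
  -- the rank of a target key: its reference position, else len(reference) + its target position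
  have hrankval : ∀ k ∈ tK, rank.getD k 0
      = if k ∈ refK then ((refK.idxOf k : Int)) else n + (tK.idxOf k : Int) := by
    intro k hk
    have h1 : rank.getD k 0
        = if k ∈ tK then pos.getD k (n + ((0 : Int) + (tK.idxOf k : Int)))
          else PySem.Dict.empty.getD k 0 :=
      getD_enumFold (fun k i => pos.getD k (n + i)) tK 0 PySem.Dict.empty k 0 (by rw [htK]; exact ht)
    have h2 : pos.getD k (n + (tK.idxOf k : Int))
        = if k ∈ refK then ((0 : Int) + (refK.idxOf k : Int))
          else PySem.Dict.empty.getD k (n + (tK.idxOf k : Int)) :=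
      getD_enumFold (fun _ i => i) refK 0 PySem.Dict.empty k (n + (tK.idxOf k : Int)) (by rw [hrefK]; exact hr)
    rw [h1, if_pos hk, zero_add, h2]
    by_cases hkr : k ∈ refK
    · rw [if_pos hkr, if_pos hkr, zero_add]
    · rw [if_neg hkr, if_neg hkr, PySem.Dict.getD_empty]
  -- the rank of every element of the canonical list, and the bounds
  have hκref : ∀ x ∈ pvRefPart target reference,
      rank.getD x.1 0 = (refK.idxOf x.1 : Int) ∧ refK.idxOf x.1 < refK.length := by
    intro x hx
    rcases (mem_refPart_iff target reference ht x).mp hx with ⟨hxt, hx1⟩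
    have hk : x.1 ∈ tK := by rw [htK]; exact List.mem_map_of_mem hxt
    have hx1' : x.1 ∈ refK := by rw [hrefK]; exact hx1
    exact ⟨by rw [hrankval x.1 hk, if_pos hx1'], List.idxOf_lt_length_of_mem hx1'⟩
  have hκtail : ∀ x ∈ pvTailPart target reference,
      rank.getD x.1 0 = n + (tK.idxOf x.1 : Int) := by
    intro x hx
    rcases List.mem_filter.mp hx with ⟨hxt, hxd⟩
    have hx1 : x.1 ∉ refK := by rw [hrefK]; simpa using hxd
    have hk : x.1 ∈ tK := by rw [htK]; exact List.mem_map_of_mem hxt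
    rw [hrankval x.1 hk, if_neg hx1]
  -- the canonical list is strictly increasing in rank
  have hpw : List.Pairwise (fun a b => rank.getD a.1 0 < rank.getD b.1 0)
      (pvRefPart target reference ++ pvTailPart target reference) := by
    rw [List.pairwise_append]
    refine ⟨?_, ?_, ?_⟩
    · have h0 : List.Pairwise (fun a b : String × String => refK.idxOf a.1 < refK.idxOf b.1)
          (pvRefPart target reference) := by
        unfold pvRefPart
        apply List.pairwise_map.mpr
        exact (pairwise_idxOf_fst reference (hrefK ▸ hr)).filter _
      refine h0.imp_of_mem ?_
      intro a b ha hb hab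
      rw [(hκref a ha).1, (hκref b hb).1]
      exact_mod_cast hab
    · have h0 : List.Pairwise (fun a b : String × String => tK.idxOf a.1 < tK.idxOf b.1)
          (pvTailPart target reference) := by
        unfold pvTailPart
        exact (pairwise_idxOf_fst target (htK ▸ ht)).filter _
      refine h0.imp_of_mem ?_
      intro a b ha hb hab
      rw [hκtail a ha, hκtail b hb]
      omega
    · intro a ha b hb
      rcases hκref a ha with ⟨hva, hba⟩
      rw [hva, hκtail b hb]
      have h1 : (refK.idxOf a.1 : Int) < n := by
        rw [hn, hrefK]
        have : refK.length = reference.length := by rw [hrefK]; simp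
        rw [← hrefK]
        omega
      omega
  -- the canonical list is a permutation of target
  have hperm : (pvRefPart target reference ++ pvTailPart target reference).Perm target := by
    have h1 : (pvRefPart target reference).Perm
        (target.filter (fun p => decide (p.1 ∈ reference.map Prod.fst))) := by
      refine (List.perm_ext_iff_of_nodup ?_ ?_).mpr ?_
      · refine List.Nodup.of_map Prod.fst ?_
        unfold pvRefPart
        rw [List.map_map]
        exact (List.filter_sublist.map _).nodup hr
      · exact (List.Nodup.of_map Prod.fst ht).filter _
      · intro x
        rw [mem_refPart_iff target reference ht x, List.mem_filter]
        simp
    exact (h1.append_right _).trans (List.filter_append_perm _ target)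
  -- nodup keys of the canonical list
  have hnodupC : ((pvRefPart target reference ++ pvTailPart target reference).map Prod.fst).Nodup := by
    rw [List.map_append]
    refine List.Nodup.append ?_ ?_ ?_
    · unfold pvRefPart
      rw [List.map_map]
      exact (List.filter_sublist.map _).nodup hr
    · exact (List.filter_sublist.map _).nodup ht
    · rw [List.disjoint_left]
      intro k hk1 hk2
      rcases List.mem_map.mp hk1 with ⟨x, hx, hxk⟩
      rcases List.mem_map.mp hk2 with ⟨y, hy, hyk⟩
      rcases (mem_refPart_iff target reference ht x).mp hx with ⟨_, hx1⟩
      rcases List.mem_filter.mp hy with ⟨_, hyd⟩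
      have : y.1 ∈ reference.map Prod.fst := by rw [hyk, ← hxk]; exact hx1
      simp [this] at hyd
  rw [PySem.List.sorted_eq_of_perm_of_pairwise_lt target
      (pvRefPart target reference ++ pvTailPart target reference)
      (fun kv => rank.getD kv.1 0) hperm hpw]
  exact items_ofList_nodup _ hnodupC

-- ===== VERDICT (by name: the statement is the Claim_ definition above) =====
theorem reorder_by_reference_py_spec : Claim_equal_reorder_by_reference_py := by
  intro target reference _ hpre
  unfold Spec_reorder_by_reference_py
  rw [A_eq_canon target reference hpre.1 hpre.2, B_eq_canon target reference hpre.1 hpre.2]
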